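-- pv_equiv track=rewrite | github.com/ranranxuejie/ThesisLoom | streamlit_app.py | _build_stage_rows
-- ===== SOURCE A (Python) =====
-- from typing import Any, Dict
--
-- def _build_stage_rows(state: Dict[str, Any]) -> list[Dict[str, Any]]:
--     phase = str(state.get("workflow_phase", "idle"))
--     current_node = str(state.get("current_node", ""))
--     order = [
--         ("idle", "初始化"),
--         ("pre_research", "检索前准备"),
--         ("drafting", "正文写作"),
--         ("review_pending", "等待进入审稿"),
--         ("reviewing", "审稿与重写"),
--         ("done", "完成"),
--     ]
--     phase_idx = -1
--     for idx, item in enumerate(order):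
--         if item[0] == phase:
--             phase_idx = idx
--             break
--
--     rows = []
--     for idx, (key, name) in enumerate(order):
--         done_mark = "✅" if (phase_idx >= idx and phase_idx >= 0) else "⬜"
--         is_current = "👉" if key == phase else ""
--         rows.append(
--             {
--                 "完成": done_mark,
--                 "阶段": name,
--                 "phase_key": key,
--                 "当前": is_current,
--                 "节点": current_node if key == phase else "",
--             }
--         )
--     return rows
-- ===== SOURCE B (Python) =====
-- from typing import Any, Dict
--
-- def _build_stage_rows(state: Dict[str, Any]) -> list[Dict[str, Any]]:
--     phase = str(state.get("workflow_phase", "idle"))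
--     current_node = str(state.get("current_node", ""))
--     order = [
--         ("idle", "初始化"),
--         ("pre_research", "检索前准备"),
--         ("drafting", "正文写作"),
--         ("review_pending", "等待进入审稿"),
--         ("reviewing", "审稿与重写"),
--         ("done", "完成"),
--     ]
--     # single forward sweep: 'done' stays true up to and including the current phase
--     done = any(key == phase for key, _ in order)
--     rows = []
--     for key, name in order:
--         rows.append(
--             {
--                 "完成": "✅" if done else "⬜",
--                 "阶段": name,
--                 "phase_key": key,
--                 "当前": "👉" if key == phase else "",
--                 "节点": current_node if key == phase else "",
--             }
--         )
--         if key == phase: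
--             done = False
--     return rows
-- ===== Notes on version B (the rewrite author's own statement) =====
-- stated objective: simpler
-- what changed: Dropped A's separate index-finding loop and per-row index comparison in favour of a single forward sweep over the stage list carrying a running 'done' boolean that flips off after the current phase's row is emitted.
import Mathlib
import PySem

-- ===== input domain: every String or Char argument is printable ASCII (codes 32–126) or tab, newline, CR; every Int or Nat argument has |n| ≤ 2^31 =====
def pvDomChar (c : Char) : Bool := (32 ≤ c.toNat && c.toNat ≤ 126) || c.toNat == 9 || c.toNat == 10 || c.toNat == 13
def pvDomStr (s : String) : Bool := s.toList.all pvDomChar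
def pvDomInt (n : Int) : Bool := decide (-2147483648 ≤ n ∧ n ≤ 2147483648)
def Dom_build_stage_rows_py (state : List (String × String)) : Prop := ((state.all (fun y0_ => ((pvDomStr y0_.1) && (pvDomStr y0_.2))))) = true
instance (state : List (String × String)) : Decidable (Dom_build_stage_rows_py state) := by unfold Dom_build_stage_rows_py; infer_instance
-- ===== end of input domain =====

-- B replaces A's two sequential passes (find phase index, then compare indices) by one
-- forward sweep carrying a running 'done' boolean; same rows, simpler decomposition.

-- shared: state.get(key, default) on the association list (first match)
def pvGet (state : List (String × String)) (key dflt : String) : String :=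
  match state.find? (fun p => p.1 == key) with
  | some p => p.2
  | none => dflt

def pvOrder : List (String × String) :=
  [("idle", "初始化"), ("pre_research", "检索前准备"), ("drafting", "正文写作"),
   ("review_pending", "等待进入审稿"), ("reviewing", "审稿与重写"), ("done", "完成")]

-- ===== PORT A =====
-- the first loop of A: first index whose key equals phase, else -1 (break = stop at first hit)
def findPhaseIdx (phase : String) : List (Int × (String × String)) → Int
  | [] => -1
  | (idx, item) :: rest => if item.1 == phase then idx else findPhaseIdx phase rest

def build_stage_rows_py (state : List (String × String)) : List (List (String × String)) :=
  let phase := pvGet state "workflow_phase" "idle"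
  let current_node := pvGet state "current_node" ""
  let phase_idx := findPhaseIdx phase (PySem.List.enumerate pvOrder)
  (PySem.List.enumerate pvOrder).foldl
    (fun rows p =>
      rows ++ [[("完成", if phase_idx ≥ p.1 ∧ phase_idx ≥ 0 then "✅" else "⬜"),
                ("阶段", p.2.2), ("phase_key", p.2.1),
                ("当前", if p.2.1 == phase then "👉" else ""),
                ("节点", if p.2.1 == phase then current_node else "")]]) []

-- ===== PORT B =====
-- single sweep; 'done' flips to false after the current phase's row is emitted
def sweepRows (phase current_node : String) : Bool → List (String × String) → List (List (String × String))
  | _, [] => []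
  | done, (key, name) :: rest =>
      [("完成", if done then "✅" else "⬜"), ("阶段", name), ("phase_key", key),
       ("当前", if key == phase then "👉" else ""),
       ("节点", if key == phase then current_node else "")]
      :: sweepRows phase current_node (if key == phase then false else done) rest

def build_stage_rows_py_alt (state : List (String × String)) : List (List (String × String)) :=
  let phase := pvGet state "workflow_phase" "idle"
  let current_node := pvGet state "current_node" ""
  sweepRows phase current_node (pvOrder.any (fun p => p.1 == phase)) pvOrder

-- ===== PRECONDITION & SPEC =====
def Spec_build_stage_rows_py (state : List (String × String)) (out : List (List (String × String))) : Prop := out = build_stage_rows_py_alt state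
instance (state : List (String × String)) (out : List (List (String × String))) : Decidable (Spec_build_stage_rows_py state out) := by unfold Spec_build_stage_rows_py; infer_instance

-- ===== CLAIM (what is proved, stated in full; the proofs are below) =====
def Claim_equal_build_stage_rows_py : Prop := ∀ (state : List (String × String)), Dom_build_stage_rows_py state → Spec_build_stage_rows_py state (build_stage_rows_py state)

-- ===== LEMMAS AND PROOFS =====

-- core: the two row-building computations agree for every phase / current_node
theorem core_eq (phase cn : String) :
    (PySem.List.enumerate pvOrder).foldl
      (fun rows p =>
        rows ++ [[("完成", if findPhaseIdx phase (PySem.List.enumerate pvOrder) ≥ p.1 ∧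
                           findPhaseIdx phase (PySem.List.enumerate pvOrder) ≥ 0 then "✅" else "⬜"),
                  ("阶段", p.2.2), ("phase_key", p.2.1),
                  ("当前", if p.2.1 == phase then "👉" else ""),
                  ("节点", if p.2.1 == phase then cn else "")]]) []
    = sweepRows phase cn (pvOrder.any (fun p => p.1 == phase)) pvOrder := by
  by_cases h1 : phase = "idle"
  · subst h1; simp [pvOrder, PySem.List.enumerate, findPhaseIdx, sweepRows]
  · by_cases h2 : phase = "pre_research"
    · subst h2; simp [pvOrder, PySem.List.enumerate, findPhaseIdx, sweepRows]
    · by_cases h3 : phase = "drafting"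
      · subst h3; simp [pvOrder, PySem.List.enumerate, findPhaseIdx, sweepRows]
      · by_cases h4 : phase = "review_pending"
        · subst h4; simp [pvOrder, PySem.List.enumerate, findPhaseIdx, sweepRows]
        · by_cases h5 : phase = "reviewing"
          · subst h5; simp [pvOrder, PySem.List.enumerate, findPhaseIdx, sweepRows]
          · by_cases h6 : phase = "done"
            · subst h6; simp [pvOrder, PySem.List.enumerate, findPhaseIdx, sweepRows]
            · simp [pvOrder, PySem.List.enumerate, findPhaseIdx, sweepRows,
                    Ne.symm h1, Ne.symm h2, Ne.symm h3, Ne.symm h4, Ne.symm h5, Ne.symm h6]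

-- ===== VERDICT (by name: the statement is the Claim_ definition above) =====
theorem build_stage_rows_py_spec : Claim_equal_build_stage_rows_py := by
  intro state _
  unfold Spec_build_stage_rows_py build_stage_rows_py build_stage_rows_py_alt
  exact core_eq (pvGet state "workflow_phase" "idle") (pvGet state "current_node" "")
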